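-- pv_equiv track=rewrite | github.com/wangsun39/leetcode | allcode/3800-3899/3886sortableIntegers.py | sortableIntegers
-- ===== SOURCE A (Python) =====
-- def sortableIntegers(nums: list[int]) -> int:
--     n = len(nums)
--
--     def factors(x):
--         res = []
--         i = 1
--         while i * i <= x:
--             if x % i == 0:
--                 res.append(i)
--                 if i * i != x:
--                     res.append(x // i)
--             i += 1
--         return res
--
--     divisors = factors(n)
--
--     def k_sortable(k: int) -> bool:
--         prev_max = None
--         for b in range(0, n, k):
--             block_first = pre = mn = mx = nums[b]
--             desc = 0
--
--             for idx in range(b + 1, b + k):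
--                 cur = nums[idx]
--                 if pre > cur:
--                     desc += 1
--                     if desc > 1:
--                         return False
--                 if cur < mn:
--                     mn = cur
--                 if cur > mx:
--                     mx = cur
--                 pre = cur
--
--             if pre > block_first:
--                 desc += 1
--                 if desc > 1:
--                     return False
--
--             if prev_max is not None and prev_max > mn:
--                 return False
--             prev_max = mx
--         return True
--
--     ans = 0
--     for k in divisors:
--         if k_sortable(k):
--             ans += k
--     return ans
-- ===== SOURCE B (Python) =====
-- def sortableIntegers(nums: list[int]) -> int:
--     n = len(nums)
--
--     # One O(n) preprocessing pass builds three global tables; every block test is then O(1):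
--     #   P[i]       = number of descents (nums[j] > nums[j+1]) among positions j < i
--     #   prefMax[b] = max(nums[:b])  (for b >= 1)
--     #   sufMin[b]  = min(nums[b:])  (for b <= n-1)
--     # A block [b, b+k) is a rotated sorted run iff its internal descents P[b+k-1] - P[b]
--     # plus the wrap descent (nums[b+k-1] > nums[b]) total at most 1; and because block
--     # maxima/minima are monotone along a valid chain, the adjacent max<=min chain
--     # condition is equivalent to prefMax[b] <= sufMin[b] at every interior boundary b.
--     P = [0] * n
--     for i in range(1, n):
--         P[i] = P[i - 1] + (1 if nums[i - 1] > nums[i] else 0)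
--     prefMax = [0] * (n + 1)
--     for i in range(n):
--         prefMax[i + 1] = nums[i] if i == 0 else max(prefMax[i], nums[i])
--     sufMin = [0] * (n + 1)
--     for i in range(n - 1, -1, -1):
--         sufMin[i] = nums[i] if i == n - 1 else min(sufMin[i + 1], nums[i])
--
--     def ok(k: int) -> bool:
--         for b in range(0, n, k):
--             e = b + k - 1
--             desc = P[e] - P[b] + (1 if nums[e] > nums[b] else 0)
--             if desc > 1:
--                 return False
--             if b > 0 and prefMax[b] > sufMin[b]:
--                 return False
--         return True
--
--     ans = 0
--     k = 1
--     while k * k <= n: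
--         if n % k == 0:
--             if ok(k):
--                 ans += k
--             m = n // k
--             if m != k and ok(m):
--                 ans += m
--         k += 1
--     return ans
-- ===== Notes on version B (the rewrite author's own statement) =====
-- stated objective: alternative
-- what changed: B precomputes three global O(n) tables once (prefix descent counts, prefix maxima, suffix minima) and decides each block in O(1) - internal descents become a prefix-sum difference and the adjacent max<=min chain becomes prefMax[b] <= sufMin[b] at block boundaries - instead of A's per-divisor rescans of every element of every block.
import Mathlib
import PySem

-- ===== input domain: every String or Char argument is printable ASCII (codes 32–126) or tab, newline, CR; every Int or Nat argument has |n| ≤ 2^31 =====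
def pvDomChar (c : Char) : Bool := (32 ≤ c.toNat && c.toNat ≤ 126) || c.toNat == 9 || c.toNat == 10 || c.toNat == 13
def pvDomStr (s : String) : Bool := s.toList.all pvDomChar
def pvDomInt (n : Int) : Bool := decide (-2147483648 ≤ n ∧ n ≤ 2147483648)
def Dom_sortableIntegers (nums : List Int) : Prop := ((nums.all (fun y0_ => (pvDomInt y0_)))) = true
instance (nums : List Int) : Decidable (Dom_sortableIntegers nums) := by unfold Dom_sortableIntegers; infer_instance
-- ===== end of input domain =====

-- B replaces A's per-divisor rescans of every block element by three O(n) tables computed once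
-- (prefix descent counts, prefix maxima, suffix minima), after which each block is checked in O(1);
-- an alternative algorithm of the same overall behaviour.

-- ===== PORT A =====
-- while i * i <= x: collect divisors i and x // i
-- (fuel = an explicit iteration bound making the while-loop structural; x.toNat + 1 always suffices,
--  since the loop runs at most x times: i stays <= x while i * i <= x)
def pvFactorsGo (x : Int) : Nat → Int → List Int → List Int
  | 0, _, res => res
  | fuel + 1, i, res =>
    if i * i ≤ x then
      pvFactorsGo x fuel (i + 1)
        (if PySem.Int.mod x i = 0 then
          res ++ [i] ++ (if i * i ≠ x then [PySem.Int.floordiv x i] else [])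
        else res)
    else res

-- inner 'for idx in range(b+1, b+k)' loop of k_sortable; state (pre, mn, mx, desc); none = 'return False'.
-- nums[idx] is always in range when this is reached (k divides len(nums)); the .getD 0 default is never used.
def pvInnerA (nums : List Int) : List Int → Int → Int → Int → Int → Option (Int × Int × Int × Int)
  | [], pre, mn, mx, desc => some (pre, mn, mx, desc)
  | idx :: rest, pre, mn, mx, desc =>
    let cur := (PySem.List.pyGet? nums idx).getD 0
    if pre > cur then
      if desc + 1 > 1 then none
      else pvInnerA nums rest cur (if cur < mn then cur else mn) (if cur > mx then cur else mx) (desc + 1)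
    else pvInnerA nums rest cur (if cur < mn then cur else mn) (if cur > mx then cur else mx) desc

-- outer 'for b in range(0, n, k)' loop of k_sortable, carrying prev_max
def pvOuterA (nums : List Int) (k : Int) : List Int → Option Int → Bool
  | [], _ => true
  | b :: rest, prevMax =>
    let blockFirst := (PySem.List.pyGet? nums b).getD 0
    match pvInnerA nums (PySem.List.pyRange (b + 1) (b + k)) blockFirst blockFirst blockFirst 0 with
    | none => false
    | some (pre, mn, mx, _desc) =>
      if pre > blockFirst ∧ _desc + 1 > 1 then false
      else if (match prevMax with | some pm => decide (pm > mn) | none => false) then false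
      else pvOuterA nums k rest (some mx)

def pvKSortA (nums : List Int) (n k : Int) : Bool :=
  pvOuterA nums k (PySem.List.pyRange 0 n k) none

def sortableIntegers (nums : List Int) : Int :=
  let n : Int := nums.length
  (pvFactorsGo n (n.toNat + 1) 1 []).foldl (fun ans k => if pvKSortA nums n k then ans + k else ans) 0

-- ===== PORT B =====
-- P[i] = P[i-1] + (1 if nums[i-1] > nums[i] else 0): the 'for i in range(1, n)' fill of P,
-- transcribed as building the list left to right carrying (previous count, previous element)
def altPGo : Int → Int → List Int → List Int
  | _, _, [] => []
  | prev, x, y :: rest =>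
    (prev + (if x > y then 1 else 0)) :: altPGo (prev + (if x > y then 1 else 0)) y rest

def altP : List Int → List Int
  | [] => []
  | x :: rest => 0 :: altPGo 0 x rest

-- prefMax[i+1] = nums[i] if i == 0 else max(prefMax[i], nums[i]); prefMax[0] = 0 stays the fill value
def altPrefMaxGo : Int → List Int → List Int
  | _, [] => []
  | cur, x :: rest => max cur x :: altPrefMaxGo (max cur x) rest
def altPrefMax : List Int → List Int
  | [] => [0]
  | x :: rest => 0 :: x :: altPrefMaxGo x rest

-- sufMin[i] = nums[i] if i == n-1 else min(sufMin[i+1], nums[i]); sufMin[n] = 0 stays the fill value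
def altSufMin : List Int → List Int
  | [] => [0]
  | [x] => [x, 0]
  | x :: y :: rest =>
    match altSufMin (y :: rest) with
    | m :: ms => min x m :: m :: ms
    | [] => []

-- 'for b in range(0, n, k)' of ok(k): each block test is O(1) table lookups, early return on failure.
-- All indices are in range on the inputs reached from sortableIntegers_alt; the .getD 0 defaults are never used.
def altOkGo (nums P pm sm : List Int) (k : Int) : List Int → Bool
  | [] => true
  | b :: rest =>
    let e := b + k - 1
    let desc := (PySem.List.pyGet? P e).getD 0 - (PySem.List.pyGet? P b).getD 0
      + (if (PySem.List.pyGet? nums e).getD 0 > (PySem.List.pyGet? nums b).getD 0 then 1 else 0)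
    if desc > 1 then false
    else if b > 0 ∧ (PySem.List.pyGet? pm b).getD 0 > (PySem.List.pyGet? sm b).getD 0 then false
    else altOkGo nums P pm sm k rest

def altOk (nums P pm sm : List Int) (n k : Int) : Bool :=
  altOkGo nums P pm sm k (PySem.List.pyRange 0 n k)

-- while k * k <= n: try divisors k and n // k
-- (fuel = an explicit iteration bound making the while-loop structural; n.toNat + 1 always suffices)
def altLoop (nums P pm sm : List Int) (n : Int) : Nat → Int → Int → Int
  | 0, _, ans => ans
  | fuel + 1, k, ans =>
    if k * k ≤ n then
      altLoop nums P pm sm n fuel (k + 1)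
        (if PySem.Int.mod n k = 0 then
          let ans := if altOk nums P pm sm n k then ans + k else ans
          let m := PySem.Int.floordiv n k
          if m ≠ k ∧ altOk nums P pm sm n m then ans + m else ans
        else ans)
    else ans

def sortableIntegers_alt (nums : List Int) : Int :=
  altLoop nums (altP nums) (altPrefMax nums) (altSufMin nums)
    (nums.length : Int) (nums.length + 1) 1 0

-- ===== PRECONDITION & SPEC =====
def Spec_sortableIntegers (nums : List Int) (out : Int) : Prop := out = sortableIntegers_alt nums
instance (nums : List Int) (out : Int) : Decidable (Spec_sortableIntegers nums out) := by unfold Spec_sortableIntegers; infer_instance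

-- ===== CLAIM (what is proved, stated in full; the proofs are below) =====
def Claim_equal_sortableIntegers : Prop := ∀ (nums : List Int), Dom_sortableIntegers nums → Spec_sortableIntegers nums (sortableIntegers nums)

-- ===== LEMMAS AND PROOFS =====

-- ---- proof-side characterisation of A's k_sortable (block view) ----

-- proof-side element-level version of A's inner loop
def pvInnerE : List Int → Int → Int → Int → Int → Option (Int × Int × Int × Int)
  | [], pre, mn, mx, desc => some (pre, mn, mx, desc)
  | cur :: rest, pre, mn, mx, desc =>
    if pre > cur then
      if desc + 1 > 1 then none
      else pvInnerE rest cur (if cur < mn then cur else mn) (if cur > mx then cur else mx) (desc + 1)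
    else pvInnerE rest cur (if cur < mn then cur else mn) (if cur > mx then cur else mx) desc

-- descent count along x :: l
def dcL : Int → List Int → Int
  | _, [] => 0
  | x, c :: r => (if x > c then 1 else 0) + dcL c r

-- descent count of a whole list
def dcT : List Int → Int
  | [] => 0
  | x :: r => dcL x r

-- last element of x :: l
def lastL : Int → List Int → Int
  | x, [] => x
  | _, c :: r => lastL c r

def minOfB (bl : List Int) : Int := (PySem.List.min? bl (fun y => y)).getD 0
def maxOfB (bl : List Int) : Int := (PySem.List.max? bl (fun y => y)).getD 0

-- 'this block is a rotation of a sorted run': at most one cyclic descent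
def rotOK (bl : List Int) : Bool :=
  let desc : Int := (bl.zip bl.tail).foldl (fun a p => if p.1 > p.2 then a + 1 else a) 0
  let desc := if (PySem.List.pyGet? bl (-1)).getD 0 > (PySem.List.pyGet? bl 0).getD 0 then desc + 1 else desc
  desc ≤ 1

-- fused single-pass form of the block checks, mirroring A's outer loop shape
def fusedB : Option Int → List (List Int) → Bool
  | _, [] => true
  | pm, bl :: rest =>
    rotOK bl && !(match pm with | some m => decide (m > minOfB bl) | none => false)
      && fusedB (some (maxOfB bl)) rest

-- A's k_sortable as explicit block predicates
def blocksOfA (nums : List Int) (n k : Int) : List (List Int) :=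
  (PySem.List.pyRange 0 n k).map (fun i => PySem.List.slice nums (some i) (some (i + k)))

def aCheck (nums : List Int) (n k : Int) : Bool :=
  let blocks := blocksOfA nums n k
  blocks.all rotOK &&
    (blocks.zip blocks.tail).all (fun p => decide (maxOfB p.1 ≤ minOfB p.2))

theorem dcL_nonneg (x : Int) (l : List Int) : 0 ≤ dcL x l := by
  induction l generalizing x with
  | nil => simp [dcL]
  | cons c r ih => have := ih c; unfold dcL; split <;> omega

theorem pvInnerA_eq_E (nums : List Int) (idxs : List Int) (pre mn mx desc : Int) :
    pvInnerA nums idxs pre mn mx desc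
      = pvInnerE (idxs.map (fun i => (PySem.List.pyGet? nums i).getD 0)) pre mn mx desc := by
  induction idxs generalizing pre mn mx desc with
  | nil => rfl
  | cons i rest ih => simp only [pvInnerA, pvInnerE, List.map_cons]; split <;> [skip; exact ih ..] <;> split <;> [rfl; exact ih ..]

theorem pvInnerE_char (l : List Int) (x mn mx d : Int) (h0 : 0 ≤ d) (h1 : d ≤ 1) :
    pvInnerE l x mn mx d =
      if d + dcL x l ≤ 1 then
        some (lastL x l, l.foldl (fun a c => if c < a then c else a) mn,
              l.foldl (fun a c => if c > a then c else a) mx, d + dcL x l)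
      else none := by
  induction l generalizing x mn mx d with
  | nil => simp [pvInnerE, dcL, lastL]; omega
  | cons c r ih =>
    have hnn := dcL_nonneg c r
    simp only [pvInnerE, dcL, lastL, List.foldl_cons]
    by_cases hxc : x > c
    · simp only [if_pos hxc]
      by_cases hd : d + 1 > 1
      · rw [if_pos hd, if_neg (by omega)]
      · rw [if_neg hd, ih c _ _ (d+1) (by omega) (by omega)]
        have he : d + 1 + dcL c r = d + (1 + dcL c r) := by ring
        rw [he]
    · simp only [if_neg hxc]
      rw [ih c _ _ d h0 h1]
      simp only [zero_add]

theorem map_get_range (nums : List Int) (a m : Nat) (h : a + m ≤ nums.length) :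
    (PySem.List.pyRange (a : Int) ((a : Int) + (m : Int))).map
        (fun i => (PySem.List.pyGet? nums i).getD 0)
      = (nums.drop a).take m := by
  induction m generalizing a with
  | zero => simp [PySem.List.pyRange_one_eq_nil]
  | succ m ih =>
    have hlt : (a : Int) < (a : Int) + ((m : Int) + 1) := by omega
    rw [show ((a : Int) + ((m : Nat) + 1 : Nat)) = (a : Int) + ((m : Int) + 1) by push_cast; ring] at *
    rw [PySem.List.pyRange_one_cons hlt, List.map_cons]
    have ha : a < nums.length := by omega
    have h1 : ((a : Int) + 1) = ((a + 1 : Nat) : Int) := by push_cast; ring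
    have h2 : (a : Int) + ((m : Int) + 1) = ((a + 1 : Nat) : Int) + (m : Nat) := by push_cast; ring
    rw [show (PySem.List.pyGet? nums (a : Int)) = some nums[a] by
        rw [PySem.List.pyGet?_natCast]; simp [ha]]
    rw [h1, h2, ih (a + 1) (by omega)]
    rw [List.drop_eq_getElem_cons ha]
    rfl

-- the zip-foldl in rotOK is dcL
theorem zip_fold_eq_dcL (x : Int) (l : List Int) (d : Int) :
    ((x :: l).zip l).foldl (fun a p => if p.1 > p.2 then a + 1 else a) d = d + dcL x l := by
  induction l generalizing x d with
  | nil => simp [dcL]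
  | cons c r ih =>
    simp only [List.zip_cons_cons, List.foldl_cons, dcL]
    rw [ih c]
    split <;> ring

theorem lastL_eq (x : Int) (l : List Int) : lastL x l = ((x :: l).getLast?).getD 0 := by
  induction l generalizing x with
  | nil => rfl
  | cons c r ih => rw [lastL, ih c, List.getLast?_cons_cons]

theorem foldl_ifmin (l : List Int) (x : Int) :
    l.foldl (fun a c => if c < a then c else a) x = l.foldl min x := by
  have : (fun (a c : Int) => if c < a then c else a) = min := by
    funext a c; rw [min_def]; split <;> split <;> omega
  rw [this]

theorem foldl_ifmax (l : List Int) (x : Int) :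
    l.foldl (fun a c => if c > a then c else a) x = l.foldl max x := by
  have : (fun (a c : Int) => if c > a then c else a) = max := by
    funext a c; rw [max_def]; split <;> split <;> omega
  rw [this]

theorem rotOK_cons (x : Int) (l : List Int) :
    rotOK (x :: l)
      = decide (dcL x l + (if lastL x l > x then 1 else 0) ≤ 1) := by
  unfold rotOK
  rw [show (x :: l).tail = l from rfl, zip_fold_eq_dcL, PySem.List.pyGet?_neg_one,
      PySem.List.pyGet?_zero, ← lastL_eq]
  simp only [List.getElem?_cons_zero, Option.getD_some, zero_add]
  split <;> simp

-- one cons step of range(b, n, k)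
theorem pyRange_step_cons (b n k : Int) (hk : 0 < k) (hb : b < n) :
    PySem.List.pyRange b n k = b :: PySem.List.pyRange (b + k) n k := by
  rw [PySem.List.pyRange_of_pos _ _ hk, PySem.List.pyRange_of_pos _ _ hk, if_pos hb]
  have key : ((n - b + k - 1) / k).toNat = ((n - (b + k) + k - 1) / k).toNat + 1 := by
    have h1 : n - b + k - 1 = (n - (b + k) + k - 1) + 1 * k := by ring
    have h2 : 0 ≤ (n - (b + k) + k - 1) / k := Int.ediv_nonneg (by omega) (by omega)
    rw [h1, Int.add_mul_ediv_right _ _ (by omega)]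
    omega
  rw [key, List.range_succ_eq_map, List.map_cons]
  simp only [Nat.cast_zero, mul_zero, add_zero, List.map_map]
  congr 1
  by_cases h3 : b + k < n
  · rw [if_pos h3]
    apply List.map_congr_left
    intro j _
    simp only [Function.comp_apply]
    push_cast
    ring
  · rw [if_neg h3]
    have h5 : (n - (b + k) + k - 1) / k < 1 := by
      rw [Int.ediv_lt_iff_lt_mul hk]
      omega
    have h6 : ((n - (b + k) + k - 1) / k).toNat = 0 := by omega
    rw [h6]
    rfl

theorem minOfB_cons (x : Int) (l : List Int) : minOfB (x :: l) = l.foldl min x := by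
  unfold minOfB
  rw [PySem.List.min?_id_cons]
  rfl

theorem maxOfB_cons (x : Int) (l : List Int) : maxOfB (x :: l) = l.foldl max x := by
  unfold maxOfB
  rw [PySem.List.max?_id_cons]
  rfl

theorem block_slice (nums : List Int) (b k : Int) (hb : 0 ≤ b) (hk : 1 ≤ k)
    (hbk : b + k ≤ (nums.length : Int)) :
    PySem.List.slice nums (some b) (some (b + k))
      = ((PySem.List.pyGet? nums b).getD 0)
        :: (PySem.List.pyRange (b + 1) (b + k)).map (fun i => (PySem.List.pyGet? nums i).getD 0) := by
  obtain ⟨a, rfl⟩ : ∃ a : Nat, b = (a : Int) := ⟨b.toNat, by omega⟩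
  obtain ⟨m, rfl⟩ : ∃ m : Nat, k = (m : Int) := ⟨k.toNat, by omega⟩
  obtain ⟨m', rfl⟩ : ∃ m' : Nat, m = m' + 1 := ⟨m - 1, by omega⟩
  have hlen : a + (m' + 1) ≤ nums.length := by exact_mod_cast hbk
  have ha : a < nums.length := by omega
  rw [PySem.List.slice_natCast_add]
  rw [show ((a : Int) + 1) = ((a + 1 : Nat) : Int) by push_cast; ring,
      show ((a : Int) + ((m' + 1 : Nat) : Int)) = ((a + 1 : Nat) : Int) + ((m' : Nat) : Int) by push_cast; ring]
  rw [map_get_range nums (a + 1) m' (by omega)]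
  rw [show (PySem.List.pyGet? nums (a : Int)) = some nums[a] by
      rw [PySem.List.pyGet?_natCast]; simp [ha]]
  rw [List.drop_eq_getElem_cons ha]
  rfl

theorem pyRange_step_nil (b n k : Int) (hk : 0 < k) (hb : ¬ b < n) :
    PySem.List.pyRange b n k = [] := by
  rw [PySem.List.pyRange_of_pos _ _ hk, if_neg hb]
  rfl

theorem outer_eq_fused (nums : List Int) (k : Int) (hk : 1 ≤ k)
    (hdvd : k ∣ (nums.length : Int)) :
    ∀ (b : Int) (pm : Option Int), 0 ≤ b → b ≤ (nums.length : Int) → k ∣ b →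
      pvOuterA nums k (PySem.List.pyRange b (nums.length : Int) k) pm
        = fusedB pm ((PySem.List.pyRange b (nums.length : Int) k).map
            (fun i => PySem.List.slice nums (some i) (some (i + k)))) := by
  have main : ∀ (fuel : Nat) (b : Int) (pm : Option Int),
      ((nums.length : Int) - b).toNat ≤ fuel → 0 ≤ b → b ≤ (nums.length : Int) → k ∣ b →
      pvOuterA nums k (PySem.List.pyRange b (nums.length : Int) k) pm
        = fusedB pm ((PySem.List.pyRange b (nums.length : Int) k).map
            (fun i => PySem.List.slice nums (some i) (some (i + k)))) := by
    intro fuel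
    induction fuel with
    | zero =>
      intro b pm hf hb0 hbn _
      rw [pyRange_step_nil b _ k (by omega) (by omega)]
      rfl
    | succ fuel ih =>
      intro b pm hf hb0 hbn hdb
      by_cases hlt : b < (nums.length : Int)
      · have hdnb : k ∣ ((nums.length : Int) - b) := dvd_sub hdvd hdb
        have hbk : b + k ≤ (nums.length : Int) := by
          have := Int.le_of_dvd (by omega) hdnb
          omega
        rw [pyRange_step_cons b _ k (by omega) hlt, List.map_cons,
            block_slice nums b k hb0 hk hbk]
        simp only [pvOuterA, fusedB]
        rw [pvInnerA_eq_E, pvInnerE_char _ _ _ _ 0 le_rfl (by omega)]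
        have htail : ∀ pm', pvOuterA nums k (PySem.List.pyRange (b + k) (nums.length : Int) k) pm'
            = fusedB pm' ((PySem.List.pyRange (b + k) (nums.length : Int) k).map
                (fun i => PySem.List.slice nums (some i) (some (i + k)))) := by
          intro pm'
          exact ih (b + k) pm' (by omega) (by omega) (by omega) (dvd_add hdb dvd_rfl)
        simp only [htail]
        rw [rotOK_cons, minOfB_cons, maxOfB_cons, foldl_ifmin, foldl_ifmax]
        generalize (PySem.List.pyGet? nums b).getD 0 = x
        generalize (PySem.List.pyRange (b + 1) (b + k)).map
            (fun i => (PySem.List.pyGet? nums i).getD 0) = l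
        have hnn := dcL_nonneg x l
        by_cases h1 : (0 : Int) + dcL x l ≤ 1
        · rw [if_pos h1]
          change (if lastL x l > x ∧ 0 + dcL x l + 1 > 1 then false
            else if (match pm with
                | some pm => decide (pm > List.foldl min x l)
                | none => false) = true then false
            else fusedB (some (List.foldl max x l))
              (List.map (fun i => PySem.List.slice nums (some i) (some (i + k)))
                (PySem.List.pyRange (b + k) ((nums.length : Int)) k))) = _
          by_cases hw : lastL x l > x
          · by_cases hd1 : (0 : Int) + dcL x l + 1 > 1
            · rw [if_pos (show _ ∧ _ from ⟨hw, hd1⟩), if_pos hw,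
                  decide_eq_false (by omega : ¬ (dcL x l + 1 ≤ 1))]
              rfl
            · rw [if_neg (show ¬(_ ∧ _) from fun h => hd1 h.2), if_pos hw,
                  decide_eq_true (by omega : dcL x l + 1 ≤ 1)]
              cases pm with
              | none => simp
              | some m => by_cases hm : m > l.foldl min x <;> simp [hm]
          · rw [if_neg (show ¬(_ ∧ _) from fun h => hw h.1), if_neg hw,
                decide_eq_true (by omega : dcL x l + 0 ≤ 1)]
            cases pm with
            | none => simp
            | some m => by_cases hm : m > l.foldl min x <;> simp [hm]
        · rw [if_neg h1]
          change false = _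
          have hrot : decide (dcL x l + (if lastL x l > x then 1 else 0) ≤ 1) = false := by
            apply decide_eq_false
            by_cases hw : lastL x l > x
            · rw [if_pos hw]; omega
            · rw [if_neg hw]; omega
          rw [hrot]
          rfl
      · rw [pyRange_step_nil b _ k (by omega) hlt]
        rfl
  intro b pm hb0 hbn hdb
  exact main ((nums.length : Int) - b).toNat b pm le_rfl hb0 hbn hdb

theorem not_decide_gt (a b : Int) : (!decide (a > b)) = decide (a ≤ b) := by
  by_cases h : a > b
  · rw [decide_eq_true h, decide_eq_false (by omega)]; rfl
  · rw [decide_eq_false h, decide_eq_true (by omega)]; rfl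

theorem fusedB_eq (blocks : List (List Int)) (pm : Option Int) :
    fusedB pm blocks
      = ((match pm, blocks with
          | some m, bl :: _ => decide (m ≤ minOfB bl)
          | _, _ => true)
        && blocks.all rotOK
        && (blocks.zip blocks.tail).all (fun p => decide (maxOfB p.1 ≤ minOfB p.2))) := by
  induction blocks generalizing pm with
  | nil => cases pm <;> rfl
  | cons bl rest ih =>
    rw [show fusedB pm (bl :: rest)
          = (rotOK bl
              && !(match pm with | some m => decide (m > minOfB bl) | none => false)
              && fusedB (some (maxOfB bl)) rest) from rfl,
        ih (some (maxOfB bl))]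
    cases pm <;> cases rest <;>
      simp [not_decide_gt, Bool.and_assoc, Bool.and_comm, Bool.and_left_comm]

theorem A_char (nums : List Int) (k : Int) (hk : 1 ≤ k) (hdvd : k ∣ (nums.length : Int)) :
    pvKSortA nums (nums.length : Int) k = aCheck nums (nums.length : Int) k := by
  unfold pvKSortA aCheck blocksOfA
  rw [outer_eq_fused nums k hk hdvd 0 none le_rfl (by positivity) ⟨0, by ring⟩]
  rw [fusedB_eq]
  rfl

-- ---- B-side table lemmas ----

def blkL (nums : List Int) (k j : Nat) : List Int := (nums.drop (j * k)).take k

theorem fold_min_pull (w : List Int) : ∀ a y : Int, w.foldl min (min a y) = min a (w.foldl min y) := by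
  induction w with
  | nil => intro a y; rfl
  | cons c r ih => intro a y; simp only [List.foldl_cons, min_assoc]; exact ih a (min y c)

theorem fold_max_pull (w : List Int) : ∀ a y : Int, w.foldl max (max a y) = max a (w.foldl max y) := by
  induction w with
  | nil => intro a y; rfl
  | cons c r ih => intro a y; simp only [List.foldl_cons, max_assoc]; exact ih a (max y c)

theorem minOfB_append (u v : List Int) (hu : u ≠ []) (hv : v ≠ []) :
    minOfB (u ++ v) = min (minOfB u) (minOfB v) := by
  obtain ⟨x, l, rfl⟩ := List.exists_cons_of_ne_nil hu
  obtain ⟨y, w, rfl⟩ := List.exists_cons_of_ne_nil hv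
  rw [List.cons_append, minOfB_cons, minOfB_cons, minOfB_cons, List.foldl_append]
  simp only [List.foldl_cons]
  exact fold_min_pull w (l.foldl min x) y

theorem maxOfB_append (u v : List Int) (hu : u ≠ []) (hv : v ≠ []) :
    maxOfB (u ++ v) = max (maxOfB u) (maxOfB v) := by
  obtain ⟨x, l, rfl⟩ := List.exists_cons_of_ne_nil hu
  obtain ⟨y, w, rfl⟩ := List.exists_cons_of_ne_nil hv
  rw [List.cons_append, maxOfB_cons, maxOfB_cons, maxOfB_cons, List.foldl_append]
  simp only [List.foldl_cons]
  exact fold_max_pull w (l.foldl max x) y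

theorem fold_min_le_fold_max (r : List Int) : ∀ a b : Int, a ≤ b → r.foldl min a ≤ r.foldl max b := by
  induction r with
  | nil => intro a b h; exact h
  | cons c w ih =>
    intro a b h
    simp only [List.foldl_cons]
    exact ih _ _ (by
      have h1 : min a c ≤ a := min_le_left a c
      have h2 : b ≤ max b c := le_max_left b c
      omega)

theorem minOfB_le_maxOfB (l : List Int) (hl : l ≠ []) : minOfB l ≤ maxOfB l := by
  obtain ⟨x, r, rfl⟩ := List.exists_cons_of_ne_nil hl
  rw [minOfB_cons, maxOfB_cons]
  exact fold_min_le_fold_max r x x le_rfl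

theorem altPGo_get (rest : List Int) : ∀ (x p : Int) (j : Nat), j < rest.length →
    (altPGo p x rest)[j]? = some (p + dcL x (rest.take (j + 1))) := by
  induction rest with
  | nil => intro x p j h; simp at h
  | cons y r ih =>
    intro x p j h
    cases j with
    | zero => simp [altPGo, List.take, dcL]
    | succ j =>
      simp only [altPGo, List.getElem?_cons_succ, List.take, dcL]
      rw [ih y _ j (by simpa using h)]
      congr 1
      ring

theorem altP_get (nums : List Int) (i : Nat) (h : i < nums.length) :
    (altP nums)[i]? = some (dcT (nums.take (i + 1))) := by
  cases nums with
  | nil => simp at h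
  | cons x rest =>
    cases i with
    | zero => simp [altP, dcT, List.take, dcL]
    | succ i =>
      simp only [altP, List.getElem?_cons_succ]
      rw [altPGo_get rest x 0 i (by simpa using h)]
      simp only [zero_add, List.take, dcT]

theorem altPrefMaxGo_get (rest : List Int) : ∀ (cur : Int) (j : Nat), j < rest.length →
    (altPrefMaxGo cur rest)[j]? = some ((rest.take (j + 1)).foldl max cur) := by
  induction rest with
  | nil => intro cur j h; simp at h
  | cons x r ih =>
    intro cur j h
    cases j with
    | zero => simp [altPrefMaxGo, List.take]
    | succ j =>
      simp only [altPrefMaxGo, List.getElem?_cons_succ, List.take, List.foldl_cons]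
      exact ih (max cur x) j (by simpa using h)

theorem altPrefMax_get (nums : List Int) (b : Nat) (hb : 1 ≤ b) (hbn : b ≤ nums.length) :
    (altPrefMax nums)[b]? = some (maxOfB (nums.take b)) := by
  cases nums with
  | nil => simp at hbn; omega
  | cons x rest =>
    match b, hb with
    | 1, _ => simp [altPrefMax, List.take, maxOfB_cons]
    | (j + 2), _ =>
      simp only [altPrefMax, List.getElem?_cons_succ]
      rw [altPrefMaxGo_get rest x j (by simpa using hbn)]
      rw [show (x :: rest).take (j + 2) = x :: rest.take (j + 1) from rfl, maxOfB_cons]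

theorem altSufMin_ne_nil (l : List Int) : altSufMin l ≠ [] := by
  match l with
  | [] => simp [altSufMin]
  | [x] => simp [altSufMin]
  | x :: y :: rest =>
    have := altSufMin_ne_nil (y :: rest)
    simp only [altSufMin]
    cases h : altSufMin (y :: rest) with
    | nil => exact absurd h this
    | cons m ms => simp

theorem altSufMin_get (nums : List Int) : ∀ (b : Nat), b < nums.length →
    (altSufMin nums)[b]? = some (minOfB (nums.drop b)) := by
  match nums with
  | [] => intro b h; simp at h
  | [x] =>
    intro b h
    cases b with
    | zero => simp [altSufMin, minOfB_cons]
    | succ b => simp at h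
  | x :: y :: rest =>
    intro b h
    have hne := altSufMin_ne_nil (y :: rest)
    obtain ⟨m, ms, hm⟩ := List.exists_cons_of_ne_nil hne
    have ih := altSufMin_get (y :: rest)
    cases b with
    | zero =>
      have h0 := ih 0 (by simp)
      rw [hm] at h0
      simp only [List.getElem?_cons_zero, Option.some.injEq, List.drop_zero] at h0
      simp only [altSufMin, hm, List.getElem?_cons_zero, List.drop_zero, Option.some.injEq]
      rw [h0, minOfB_cons, minOfB_cons]
      simp only [List.foldl_cons]
      rw [← fold_min_pull]
    | succ b =>
      simp only [altSufMin, hm, List.getElem?_cons_succ, List.drop_succ_cons]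
      rw [← hm]
      exact ih b (by simpa using h)

-- descent-count splitting
theorem dcL_append (l v : List Int) : ∀ x : Int, dcL x (l ++ v) = dcL x l + dcL (lastL x l) v := by
  induction l with
  | nil => intro x; simp [dcL, lastL]
  | cons c r ih =>
    intro x
    simp only [List.cons_append, dcL, lastL]
    rw [ih c]
    ring

theorem dcT_concat (u v : List Int) (hu : u ≠ []) :
    dcT (u ++ v) = dcT u + dcL ((u.getLast?).getD 0) v := by
  obtain ⟨z, u', rfl⟩ := List.exists_cons_of_ne_nil hu
  simp only [List.cons_append, dcT]
  rw [dcL_append u' v z, ← lastL_eq]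

-- ---- chain equivalence: adjacent block condition ⇔ boundary prefMax/sufMin condition ----

theorem blkL_length (nums : List Int) (k J j : Nat) (hJ : J * k = nums.length) (hj : j < J) :
    (blkL nums k j).length = k := by
  unfold blkL
  rw [List.length_take, List.length_drop]
  have : (j + 1) * k ≤ J * k := Nat.mul_le_mul_right k hj
  rw [Nat.succ_mul] at this
  omega

theorem blkL_ne_nil (nums : List Int) (k J j : Nat) (hk : 1 ≤ k) (hJ : J * k = nums.length)
    (hj : j < J) : blkL nums k j ≠ [] := by
  have := blkL_length nums k J j hJ hj
  intro hcon
  rw [hcon] at this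
  simp at this
  omega

theorem drop_split (nums : List Int) (k J j : Nat) (hJ : J * k = nums.length) (hj : j < J) :
    nums.drop (j * k) = blkL nums k j ++ nums.drop ((j + 1) * k) := by
  unfold blkL
  rw [Nat.succ_mul, ← List.drop_drop, List.take_append_drop]

theorem take_split (nums : List Int) (k j : Nat) :
    nums.take ((j + 1) * k) = nums.take (j * k) ++ blkL nums k j := by
  unfold blkL
  rw [Nat.succ_mul, List.take_add]

theorem take_ne_nil_of_pos (nums : List Int) (m : Nat) (h1 : 1 ≤ m) (h2 : m ≤ nums.length) :
    nums.take m ≠ [] := by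
  have : (nums.take m).length = m := by rw [List.length_take]; omega
  intro hcon
  rw [hcon] at this
  simp at this
  omega

theorem maxTake_eq (nums : List Int) (k J : Nat) (hk : 1 ≤ k) (hJ : J * k = nums.length)
    (CA : ∀ i, i + 1 < J → maxOfB (blkL nums k i) ≤ minOfB (blkL nums k (i + 1))) :
    ∀ j, 1 ≤ j → j ≤ J → maxOfB (nums.take (j * k)) = maxOfB (blkL nums k (j - 1)) := by
  intro j
  induction j with
  | zero => omega
  | succ j ih =>
    intro _ hj
    cases Nat.eq_or_lt_of_le (show 1 ≤ j + 1 from by omega) with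
    | inl h =>
      have hj0 : j = 0 := by omega
      subst hj0
      simp [blkL]
    | inr h =>
      have hj1 : 1 ≤ j := by omega
      rw [take_split, maxOfB_append _ _
        (take_ne_nil_of_pos nums (j * k) (by nlinarith) (by
          have : j * k ≤ J * k := Nat.mul_le_mul_right k (by omega)
          omega))
        (blkL_ne_nil nums k J j hk hJ (by omega))]
      rw [ih hj1 (by omega)]
      have hle : maxOfB (blkL nums k (j - 1)) ≤ maxOfB (blkL nums k j) := by
        have h1 := CA (j - 1) (by omega)
        have h2 := minOfB_le_maxOfB (blkL nums k j) (blkL_ne_nil nums k J j hk hJ (by omega))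
        rw [show j - 1 + 1 = j from by omega] at h1
        omega
      simp only [Nat.add_sub_cancel]
      omega

theorem minDrop_eq (nums : List Int) (k J : Nat) (hk : 1 ≤ k) (hJ : J * k = nums.length)
    (CA : ∀ i, i + 1 < J → maxOfB (blkL nums k i) ≤ minOfB (blkL nums k (i + 1))) :
    ∀ d j, j + d + 1 = J → minOfB (nums.drop (j * k)) = minOfB (blkL nums k j) := by
  intro d
  induction d with
  | zero =>
    intro j hj
    have : nums.drop (j * k) = blkL nums k j := by
      unfold blkL
      rw [List.take_of_length_le]
      rw [List.length_drop]
      have : (j + 1) * k = J * k := by rw [hj]  -- j + 1 = J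
      have h2 : (j + 1) * k = nums.length := by rw [show j + 1 = J from by omega, hJ]
      rw [Nat.succ_mul] at h2
      omega
    rw [this]
  | succ d ih =>
    intro j hj
    rw [drop_split nums k J j hJ (by omega)]
    rw [minOfB_append _ _ (blkL_ne_nil nums k J j hk hJ (by omega)) (by
      rw [drop_split nums k J (j + 1) hJ (by omega)]
      exact fun hcon => (blkL_ne_nil nums k J (j + 1) hk hJ (by omega)) (List.append_eq_nil_iff.mp hcon).1)]
    rw [ih (j + 1) (by omega)]
    have h1 := CA j (by omega)
    have h2 := minOfB_le_maxOfB (blkL nums k j) (blkL_ne_nil nums k J j hk hJ (by omega))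
    omega

theorem chainAB (nums : List Int) (k J : Nat) (hk : 1 ≤ k) (hJ : J * k = nums.length) :
    (∀ i, i + 1 < J → maxOfB (blkL nums k i) ≤ minOfB (blkL nums k (i + 1)))
      ↔ (∀ j, 1 ≤ j → j < J → maxOfB (nums.take (j * k)) ≤ minOfB (nums.drop (j * k))) := by
  constructor
  · intro CA j hj1 hjJ
    rw [maxTake_eq nums k J hk hJ CA j hj1 (by omega),
        minDrop_eq nums k J hk hJ CA (J - j - 1) j (by omega)]
    have := CA (j - 1) (by omega)
    rw [show j - 1 + 1 = j from by omega] at this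
    exact this
  · intro CB i hi
    have step1 : maxOfB (blkL nums k i) ≤ maxOfB (nums.take ((i + 1) * k)) := by
      cases Nat.eq_zero_or_pos i with
      | inl h0 =>
        subst h0
        simp [blkL]
      | inr hpos =>
        rw [take_split, maxOfB_append _ _
          (take_ne_nil_of_pos nums (i * k) (by nlinarith) (by
            have : i * k ≤ J * k := Nat.mul_le_mul_right k (by omega)
            omega))
          (blkL_ne_nil nums k J i hk hJ (by omega))]
        exact le_max_right _ _
    have step3 : minOfB (nums.drop ((i + 1) * k)) ≤ minOfB (blkL nums k (i + 1)) := by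
      rw [drop_split nums k J (i + 1) hJ (by omega)]
      by_cases hend : nums.drop ((i + 1 + 1) * k) = []
      · rw [hend, List.append_nil]
      · rw [minOfB_append _ _ (blkL_ne_nil nums k J (i + 1) hk hJ (by omega)) hend]
        exact min_le_left _ _
    have step2 := CB (i + 1) (by omega) (by omega)
    omega

-- ---- assembling the per-divisor equality ----

theorem pyRange_zero_mul (n k J : Nat) (hk : 1 ≤ k) (hJ : J * k = n) :
    PySem.List.pyRange 0 (n : Int) (k : Int)
      = (List.range J).map (fun j => ((j * k : Nat) : Int)) := by
  rw [PySem.List.pyRange_of_pos 0 (n : Int) (by exact_mod_cast hk)]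
  rcases Nat.eq_zero_or_pos n with h0 | hpos
  · subst h0
    have hJ0 : J = 0 := by
      rcases Nat.eq_zero_or_pos J with h | h
      · exact h
      · nlinarith
    subst hJ0
    simp
  · rw [if_pos (by exact_mod_cast hpos)]
    have hcount : (((n : Int) - 0 + (k : Int) - 1) / (k : Int)).toNat = J := by
      have h1 : (n : Int) - 0 + (k : Int) - 1 = ((k : Int) - 1) + (J : Int) * (k : Int) := by
        push_cast [← hJ]
        ring
      rw [h1, Int.add_mul_ediv_right _ _ (by omega : (k : Int) ≠ 0)]
      rw [Int.ediv_eq_zero_of_lt (by omega) (by omega)]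
      omega
    rw [hcount]
    apply List.map_congr_left
    intro j _
    push_cast
    ring

theorem zip_tail_all : ∀ (l : List (List Int)),
    (((l.zip l.tail).all fun p => decide (maxOfB p.1 ≤ minOfB p.2)) = true)
      ↔ (∀ i : Nat, (h : i + 1 < l.length) → maxOfB (l[i]'(by omega)) ≤ minOfB (l[i+1]'h)) := by
  intro l
  induction l with
  | nil => simp
  | cons x l ih =>
    cases l with
    | nil => simp
    | cons y r =>
      simp only [List.tail_cons, List.zip_cons_cons, List.all_cons, Bool.and_eq_true]
      rw [show ((y :: r).zip ((y :: r).tail)).all (fun p => decide (maxOfB p.1 ≤ minOfB p.2))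
            = (((y :: r).zip r).all fun p => decide (maxOfB p.1 ≤ minOfB p.2)) from rfl] at ih
      rw [ih]
      constructor
      · rintro ⟨h0, hrest⟩ i h
        cases i with
        | zero => simpa using h0
        | succ i => exact hrest i (by simpa using h)
      · intro h
        refine ⟨by simpa using h 0 (by simp), fun i hi => ?_⟩
        exact h (i + 1) (by simpa using hi)

theorem altOkGo_all (nums P pm sm : List Int) (k : Int) (bs : List Int) :
    altOkGo nums P pm sm k bs
      = bs.all (fun b =>
          if ((PySem.List.pyGet? P (b + k - 1)).getD 0 - (PySem.List.pyGet? P b).getD 0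
              + (if (PySem.List.pyGet? nums (b + k - 1)).getD 0 > (PySem.List.pyGet? nums b).getD 0 then 1 else 0) : Int) > 1 then false
          else if b > 0 ∧ (PySem.List.pyGet? pm b).getD 0 > (PySem.List.pyGet? sm b).getD 0 then false
          else true) := by
  induction bs with
  | nil => rfl
  | cons b rest ih =>
    simp only [altOkGo, List.all_cons]
    by_cases hd : ((PySem.List.pyGet? P (b + k - 1)).getD 0 - (PySem.List.pyGet? P b).getD 0
        + (if (PySem.List.pyGet? nums (b + k - 1)).getD 0 > (PySem.List.pyGet? nums b).getD 0 then 1 else 0) : Int) > 1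
    · rw [if_pos hd, if_pos hd]
      simp
    · rw [if_neg hd, if_neg hd]
      by_cases hb : b > 0 ∧ (PySem.List.pyGet? pm b).getD 0 > (PySem.List.pyGet? sm b).getD 0
      · rw [if_pos hb, if_pos hb]
        simp
      · rw [if_neg hb, if_neg hb]
        simpa using ih

-- per-block data: first element, interior, last element, descent counts
theorem blk_cons (nums : List Int) (k J j : Nat) (hk : 1 ≤ k) (hJ : J * k = nums.length)
    (hj : j < J) :
    blkL nums k j = nums[j * k]'(by
        have : (j + 1) * k ≤ J * k := Nat.mul_le_mul_right k hj
        rw [Nat.succ_mul] at this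
        omega)
      :: (nums.drop (j * k + 1)).take (k - 1) := by
  cases k with
  | zero => omega
  | succ k' =>
    have hlt : j * (k' + 1) < nums.length := by
      have : (j + 1) * (k' + 1) ≤ J * (k' + 1) := Nat.mul_le_mul_right _ hj
      rw [Nat.succ_mul] at this
      omega
    unfold blkL
    rw [List.drop_eq_getElem_cons hlt, List.take_succ_cons]
    simp

theorem dc_diff (nums : List Int) (m r : Nat) (hm : m < nums.length) (hmr : m + r < nums.length) :
    dcT (nums.take (m + r + 1)) - dcT (nums.take (m + 1))
      = dcL (nums[m]'hm) ((nums.drop (m + 1)).take r) := by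
  rw [show m + r + 1 = (m + 1) + r from by omega, List.take_add]
  rw [dcT_concat _ _ (take_ne_nil_of_pos nums (m + 1) (by omega) (by omega))]
  have hlastu : ((nums.take (m + 1)).getLast?).getD 0 = nums[m]'hm := by
    rw [List.getLast?_eq_getElem?]
    have hlen : (nums.take (m + 1)).length = m + 1 := by rw [List.length_take]; omega
    rw [hlen]
    simp only [Nat.add_sub_cancel]
    rw [List.getElem?_take, if_pos (by omega), List.getElem?_eq_getElem hm]
    rfl
  rw [hlastu]
  ring

theorem last_blk (nums : List Int) (m r : Nat) (hm : m < nums.length) (hmr : m + r < nums.length) :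
    lastL (nums[m]'hm) ((nums.drop (m + 1)).take r) = nums[m + r]'hmr := by
  rw [lastL_eq]
  have hcons : nums[m]'hm :: (nums.drop (m + 1)).take r = (nums.drop m).take (r + 1) := by
    rw [List.drop_eq_getElem_cons hm, List.take_succ_cons]
  rw [hcons, List.getLast?_eq_getElem?]
  have hlen : ((nums.drop m).take (r + 1)).length = r + 1 := by
    rw [List.length_take, List.length_drop]; omega
  rw [hlen]
  simp only [Nat.add_sub_cancel]
  rw [List.getElem?_take, if_pos (by omega), List.getElem?_drop, List.getElem?_eq_getElem hmr]
  rfl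

theorem gval (nums : List Int) (k J j : Nat) (hk : 1 ≤ k) (hJ : J * k = nums.length)
    (hj : j < J) :
    ((if ((PySem.List.pyGet? (altP nums) (((j * k : Nat) : Int) + (k : Int) - 1)).getD 0
          - (PySem.List.pyGet? (altP nums) ((j * k : Nat) : Int)).getD 0
          + (if (PySem.List.pyGet? nums (((j * k : Nat) : Int) + (k : Int) - 1)).getD 0
                > (PySem.List.pyGet? nums ((j * k : Nat) : Int)).getD 0 then 1 else 0) : Int) > 1 then false
      else if ((j * k : Nat) : Int) > 0
          ∧ (PySem.List.pyGet? (altPrefMax nums) ((j * k : Nat) : Int)).getD 0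
              > (PySem.List.pyGet? (altSufMin nums) ((j * k : Nat) : Int)).getD 0 then false
      else true) = true)
    ↔ (rotOK (blkL nums k j) = true
        ∧ (1 ≤ j → maxOfB (nums.take (j * k)) ≤ minOfB (nums.drop (j * k)))) := by
  have hjk : (j + 1) * k ≤ nums.length := by
    have h1 : (j + 1) * k ≤ J * k := Nat.mul_le_mul_right k (by omega)
    omega
  have hkk : j * k + k ≤ nums.length := by rw [Nat.succ_mul] at hjk; omega
  have hblt : j * k < nums.length := by omega
  have helt : j * k + (k - 1) < nums.length := by omega
  have hcast : (((j * k : Nat) : Int) + (k : Int) - 1) = ((j * k + (k - 1) : Nat) : Int) := by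
    push_cast
    omega
  rw [hcast]
  simp only [PySem.List.pyGet?_natCast]
  simp only [altP_get nums (j * k + (k - 1)) helt, altP_get nums (j * k) hblt,
      List.getElem?_eq_getElem helt, List.getElem?_eq_getElem hblt, Option.getD_some]
  have hdc : dcT (nums.take (j * k + (k - 1) + 1)) - dcT (nums.take (j * k + 1))
      = dcL (nums[j * k]'hblt) ((nums.drop (j * k + 1)).take (k - 1)) :=
    dc_diff nums (j * k) (k - 1) hblt helt
  have hrot : rotOK (blkL nums k j)
      = decide (dcL (nums[j * k]'hblt) ((nums.drop (j * k + 1)).take (k - 1))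
          + (if lastL (nums[j * k]'hblt) ((nums.drop (j * k + 1)).take (k - 1))
                > nums[j * k]'hblt then 1 else 0) ≤ 1) := by
    rw [blk_cons nums k J j hk hJ hj, rotOK_cons]
  have hlast : lastL (nums[j * k]'hblt) ((nums.drop (j * k + 1)).take (k - 1))
      = nums[j * k + (k - 1)]'helt := last_blk nums (j * k) (k - 1) hblt helt
  simp only [hrot, hlast, hdc]
  by_cases hd : (dcL (nums[j * k]'hblt) ((nums.drop (j * k + 1)).take (k - 1))
      + (if nums[j * k + (k - 1)]'helt > nums[j * k]'hblt then (1 : Int) else 0)) > 1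
  · rw [if_pos hd]
    constructor
    · intro hcon
      exact absurd hcon (by simp)
    · rintro ⟨hr, -⟩
      rw [decide_eq_true_iff] at hr
      omega
  · rw [if_neg hd]
    have hrot' : decide (dcL (nums[j * k]'hblt) ((nums.drop (j * k + 1)).take (k - 1))
        + (if nums[j * k + (k - 1)]'helt > nums[j * k]'hblt then (1 : Int) else 0) ≤ 1) = true :=
      decide_eq_true (by omega)
    cases Nat.eq_zero_or_pos j with
    | inl hj0 =>
      subst hj0
      rw [if_neg (by
        rintro ⟨hcon, -⟩
        simp at hcon)]
      constructor
      · intro _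
        exact ⟨hrot', fun hcon => absurd hcon (by omega)⟩
      · intro _
        rfl
    | inr hjpos =>
      have hjk1 : 1 ≤ j * k := Nat.one_le_iff_ne_zero.mpr (by positivity)
      simp only [altPrefMax_get nums (j * k) hjk1 (le_of_lt hblt),
        altSufMin_get nums (j * k) hblt, Option.getD_some]
      have hc : ((j * k : Nat) : Int) > 0 := by exact_mod_cast hjk1
      by_cases hm : maxOfB (nums.take (j * k)) > minOfB (nums.drop (j * k))
      · rw [if_pos ⟨hc, hm⟩]
        constructor
        · intro hcon
          exact absurd hcon (by simp)
        · rintro ⟨-, hb⟩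
          have := hb hjpos
          omega
      · rw [if_neg (fun hcon => hm hcon.2)]
        constructor
        · intro _
          exact ⟨hrot', fun _ => by omega⟩
        · intro _
          rfl

theorem aCheck_iff (nums : List Int) (k J : Nat) (hk : 1 ≤ k) (hJ : J * k = nums.length) :
    (aCheck nums (nums.length : Int) (k : Int) = true)
      ↔ ((∀ j, j < J → rotOK (blkL nums k j) = true)
          ∧ ∀ i, i + 1 < J → maxOfB (blkL nums k i) ≤ minOfB (blkL nums k (i + 1))) := by
  unfold aCheck blocksOfA
  rw [pyRange_zero_mul nums.length k J hk hJ, List.map_map]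
  have hcomp : ((fun i => PySem.List.slice nums (some i) (some (i + (k : Int))))
        ∘ fun j : Nat => ((j * k : Nat) : Int)) = blkL nums k := by
    funext j
    simp only [Function.comp_apply, PySem.List.slice_natCast_add]
    rfl
  rw [hcomp]
  rw [Bool.and_eq_true]
  have h1 : (((List.range J).map (blkL nums k)).all rotOK = true)
      ↔ ∀ j, j < J → rotOK (blkL nums k j) = true := by
    simp [List.all_eq_true]
  have h2 := zip_tail_all ((List.range J).map (blkL nums k))
  simp only [List.length_map, List.length_range, List.getElem_map, List.getElem_range] at h2
  rw [h1, h2]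

theorem altOk_iff (nums : List Int) (k J : Nat) (hk : 1 ≤ k) (hJ : J * k = nums.length) :
    (altOk nums (altP nums) (altPrefMax nums) (altSufMin nums) (nums.length : Int) (k : Int) = true)
      ↔ ∀ j, j < J → (rotOK (blkL nums k j) = true
          ∧ (1 ≤ j → maxOfB (nums.take (j * k)) ≤ minOfB (nums.drop (j * k)))) := by
  unfold altOk
  rw [altOkGo_all, pyRange_zero_mul nums.length k J hk hJ]
  have hall : ∀ (g : Int → Bool),
      (((List.range J).map (fun j : Nat => ((j * k : Nat) : Int))).all g = true
        ↔ ∀ j, j < J → g ((j * k : Nat) : Int) = true) := by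
    intro g
    simp [List.all_eq_true]
  rw [hall]
  exact forall_congr' fun j => imp_congr_right fun hj => gval nums k J j hk hJ hj

theorem key_nat (nums : List Int) (k : Nat) (hk : 1 ≤ k) (hdvd : k ∣ nums.length) :
    aCheck nums (nums.length : Int) (k : Int)
      = altOk nums (altP nums) (altPrefMax nums) (altSufMin nums) (nums.length : Int) (k : Int) := by
  have hJ : (nums.length / k) * k = nums.length := Nat.div_mul_cancel hdvd
  rw [Bool.eq_iff_iff, aCheck_iff nums k (nums.length / k) hk hJ,
      altOk_iff nums k (nums.length / k) hk hJ]
  constructor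
  · rintro ⟨hrot, hCA⟩ j hj
    exact ⟨hrot j hj, fun hj1 =>
      (chainAB nums k (nums.length / k) hk hJ).mp hCA j hj1 hj⟩
  · intro h
    exact ⟨fun j hj => (h j hj).1,
      (chainAB nums k (nums.length / k) hk hJ).mpr (fun j hj1 hjJ => (h j hjJ).2 hj1) ⟩

theorem key_lemma (nums : List Int) (k : Int) (hk : 1 ≤ k) (hdvd : k ∣ (nums.length : Int)) :
    pvKSortA nums (nums.length : Int) k
      = altOk nums (altP nums) (altPrefMax nums) (altSufMin nums) (nums.length : Int) k := by
  rw [A_char nums k hk hdvd]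
  obtain ⟨k', rfl⟩ : ∃ k' : Nat, k = (k' : Int) := ⟨k.toNat, by omega⟩
  exact key_nat nums k' (by exact_mod_cast hk) (by exact_mod_cast hdvd)

theorem factors_fold (nums : List Int) :
    ∀ (fuel : Nat) (x i : Int) (res : List Int), x = (nums.length : Int) → 1 ≤ i → ∀ (a : Int),
    (pvFactorsGo x fuel i res).foldl
        (fun ans k => if pvKSortA nums x k then ans + k else ans) a
      = altLoop nums (altP nums) (altPrefMax nums) (altSufMin nums) x fuel i
          (res.foldl (fun ans k => if pvKSortA nums x k then ans + k else ans) a) := by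
  intro fuel
  induction fuel with
  | zero => intro x i res hx hi a; rfl
  | succ fuel ih =>
    intro x i res hx hi a
    rw [pvFactorsGo, altLoop]
    by_cases h : i * i ≤ x
    · rw [if_pos h, if_pos h]
      rw [ih x (i + 1) _ hx (by omega) a]
      congr 1
      have hi0 : 0 < i := by omega
      by_cases hmod : PySem.Int.mod x i = 0
      · rw [if_pos hmod, if_pos hmod]
        have hidvd : i ∣ x := (PySem.Int.mod_eq_zero_iff_dvd x i).mp hmod
        have hfd : PySem.Int.floordiv x i = x / i := PySem.Int.floordiv_eq_ediv_of_pos hi0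
        have hxi : (x / i) * i = x := Int.ediv_mul_cancel hidvd
        have hkey : pvKSortA nums x i
            = altOk nums (altP nums) (altPrefMax nums) (altSufMin nums) x i := by
          subst hx; exact key_lemma nums i hi hidvd
        have hile : i ≤ x / i := by
          rw [Int.le_ediv_iff_mul_le hi0]
          exact h
        have hmdvd : (x / i) ∣ x := ⟨i, by omega⟩
        have hkeym : pvKSortA nums x (x / i)
            = altOk nums (altP nums) (altPrefMax nums) (altSufMin nums) x (x / i) := by
          subst hx; exact key_lemma nums _ (by omega) hmdvd
        rw [List.foldl_append, List.foldl_append]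
        simp only [List.foldl_cons, List.foldl_nil, hkey]
        by_cases hsq : i * i ≠ x
        · rw [if_pos hsq]
          have hne' : x / i ≠ i := by
            intro hcon
            rw [hcon] at hxi
            exact hsq hxi
          simp only [List.foldl_cons, List.foldl_nil, hfd, hkeym, ne_eq, hne',
            not_false_eq_true, true_and]
        · rw [if_neg hsq]
          replace hsq : i * i = x := not_not.mp hsq
          have heq : PySem.Int.floordiv x i = i := by
            rw [hfd]
            have h2 : (x / i) * i = i * i := by omega
            exact mul_right_cancel₀ (by omega) h2
          rw [heq]
          simp only [List.foldl_nil, ne_eq, not_true_eq_false, false_and, if_false]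
      · rw [if_neg hmod, if_neg hmod]
    · rw [if_neg h, if_neg h]

-- ===== VERDICT (by name: the statement is the Claim_ definition above) =====
theorem sortableIntegers_spec : Claim_equal_sortableIntegers := by
  intro nums _
  show sortableIntegers nums = sortableIntegers_alt nums
  unfold sortableIntegers sortableIntegers_alt
  exact factors_fold nums (nums.length + 1) (nums.length : Int) 1 [] rfl le_rfl 0
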